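-- pv_equiv track=rewrite | github.com/davidcolton/bitesofpy | 287/sum_indices.py | sum_indices
-- ===== SOURCE A (Python) =====
-- from typing import List
-- from itertools import accumulate
-- from collections import defaultdict
--
-- def sum_indices(items: List[str]) -> int:
--     # Handle simple scenario separately
--     if len(items) <= 1:
--         return 0
--
--     # Handle all other scenarios
--     indices = defaultdict(list)
--     for idx, char in enumerate(items):
--         indices[char].append(idx)
--     cumulative_totals = []
--     return sum([sum(accumulate(values)) for values in indices.values()])
-- ===== SOURCE B (Python) =====
-- def sum_indices(items):
--     # Single reverse pass with per-character running counts: each index idx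
--     # contributes idx times the number of equal items at position >= idx,
--     # which equals the sum of prefix sums of the per-character index groups.
--     total = 0
--     seen = {}
--     for idx in range(len(items) - 1, -1, -1):
--         c = items[idx]
--         seen[c] = seen.get(c, 0) + 1
--         total += seen[c] * idx
--     return total
-- ===== Notes on version B (the rewrite author's own statement) =====
-- stated objective: alternative
-- what changed: A groups indices into per-character lists and sums each group's prefix sums; B drops the grouping entirely and makes one reverse pass keeping only per-character counts, adding count*idx as it goes.
import Mathlib
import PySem

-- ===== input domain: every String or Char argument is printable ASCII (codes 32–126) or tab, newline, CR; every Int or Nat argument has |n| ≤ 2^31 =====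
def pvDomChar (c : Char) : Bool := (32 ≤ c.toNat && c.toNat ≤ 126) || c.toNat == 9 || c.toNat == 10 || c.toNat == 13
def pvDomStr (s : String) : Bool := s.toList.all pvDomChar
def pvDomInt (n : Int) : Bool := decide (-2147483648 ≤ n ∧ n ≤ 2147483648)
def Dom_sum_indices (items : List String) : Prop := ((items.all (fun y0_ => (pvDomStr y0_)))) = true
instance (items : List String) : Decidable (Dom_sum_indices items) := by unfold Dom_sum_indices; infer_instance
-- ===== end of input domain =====

-- B replaces A's per-character index grouping + prefix sums by a single reverse
-- pass maintaining only per-character counts (alternative decomposition, same result).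

-- ===== PORT A =====
-- itertools.accumulate(values): the list of running prefix sums, as a fold
-- carrying (list built so far, running total)
def pvAccumulate (l : List Int) : List Int :=
  (l.foldl (fun s x => (s.1 ++ [s.2 + x], s.2 + x)) (([] : List Int), (0 : Int))).1

def sum_indices (items : List String) : Int :=
  if PySem.List.len items ≤ 1 then 0
  else
    -- indices = defaultdict(list); for idx, char in enumerate(items): indices[char].append(idx)
    let indices := (PySem.List.enumerate items 0).foldl
      (fun d p => d.modify p.2 [] (fun v => v ++ [p.1]))
      (PySem.Dict.empty : PySem.Dict String (List Int))
    -- A's 'cumulative_totals = []' is dead code (never used) and has no port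
    ((indices.values).map (fun values => (pvAccumulate values).sum)).sum

-- ===== PORT B =====
def sum_indices_alt (items : List String) : Int :=
  ((PySem.List.pyRange (PySem.List.len items - 1) (-1) (-1)).foldl
    (fun s idx =>
      let c := PySem.List.pyGetD items idx ""   -- items[idx]; idx is always in range here
      let seen := s.2.insert c (s.2.getD c 0 + 1)
      (s.1 + seen.getD c 0 * idx, seen))
    ((0 : Int), (PySem.Dict.empty : PySem.Dict String Int))).1

-- ===== PRECONDITION & SPEC =====
def Spec_sum_indices (items : List String) (out : Int) : Prop := out = sum_indices_alt items
instance (items : List String) (out : Int) : Decidable (Spec_sum_indices items out) := by unfold Spec_sum_indices; infer_instance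

-- ===== CLAIM (what is proved, stated in full; the proofs are below) =====
def Claim_equal_sum_indices : Prop := ∀ (items : List String), Dom_sum_indices items → Spec_sum_indices items (sum_indices items)

-- ===== LEMMAS AND PROOFS =====

-- the indices (in increasing order) at which `c` occurs in `items`
def pvIdxList (c : String) (items : List String) : List Int :=
  ((PySem.List.enumerate items 0).filter (fun p => p.2 == c)).map (fun p => p.1)

-- the common value: sum over distinct characters of the prefix-sums total of its index group
def pvG (items : List String) : Int :=
  ((PySem.Set.ofList items).map (fun c => (pvAccumulate (pvIdxList c items)).sum)).sum

-- weight of a count dictionary against the positions of `items`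
def pvW (items : List String) (d : PySem.Dict String Int) : Int :=
  ((PySem.List.enumerate items 0).map (fun p => d.getD p.2 0 * p.1)).sum

-- B's loop body, named for the proofs (definitionally the lambda in sum_indices_alt)
def pvBody (items : List String) : Int × PySem.Dict String Int → Int → Int × PySem.Dict String Int :=
  fun s idx =>
    let c := PySem.List.pyGetD items idx ""
    let seen := s.2.insert c (s.2.getD c 0 + 1)
    (s.1 + seen.getD c 0 * idx, seen)

lemma pvAccum_snd (l : List Int) (ys : List Int) (run : Int) :
    (l.foldl (fun s x => (s.1 ++ [s.2 + x], s.2 + x)) (ys, run)).2 = run + l.sum := by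
  induction l generalizing ys run with
  | nil => simp
  | cons x t ih => simp [List.foldl_cons, ih]; ring

lemma pvAccum_sum_snoc (v : List Int) (x : Int) :
    (pvAccumulate (v ++ [x])).sum = (pvAccumulate v).sum + v.sum + x := by
  unfold pvAccumulate
  rw [List.foldl_append]
  simp [pvAccum_snd]
  ring

lemma pvIdxList_snoc (c : String) (items : List String) (x : String) :
    pvIdxList c (items ++ [x]) =
      pvIdxList c items ++ (if x == c then [(items.length : Int)] else []) := by
  unfold pvIdxList
  rw [PySem.List.enumerate_append, List.filter_append, List.map_append]
  by_cases h : x == c <;> simp [PySem.List.enumerate, h]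

lemma pvIdxList_of_not_mem (x : String) (items : List String) (hx : x ∉ items) :
    pvIdxList x items = [] := by
  unfold pvIdxList
  rw [List.filter_eq_nil_iff.mpr, List.map_nil]
  intro p hp
  rcases (PySem.List.mem_enumerate_iff items 0 p).mp hp with ⟨k, hk, rfl⟩
  intro h
  exact hx (eq_of_beq h ▸ List.getElem_mem hk)

lemma pvSum_map_congr_except {l : List String} (hl : l.Nodup) {x : String} (hx : x ∈ l)
    (f g : String → Int) (h : ∀ c ∈ l, c ≠ x → f c = g c) :
    (l.map f).sum = (l.map g).sum + f x - g x := by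
  induction l with
  | nil => cases hx
  | cons a t ih =>
    rcases List.mem_cons.mp hx with rfl | hxt
    · have ht : ∀ c ∈ t, f c = g c := by
        intro c hc
        exact h c (List.mem_cons_of_mem _ hc) (fun he => (List.nodup_cons.mp hl).1 (he ▸ hc))
      simp [List.map_congr_left ht]
      ring
    · have ha : f a = g a := h a (List.mem_cons_self) (fun he => (List.nodup_cons.mp hl).1 (he ▸ hxt))
      have := ih (List.nodup_cons.mp hl).2 hxt (fun c hc hcx => h c (List.mem_cons_of_mem _ hc) hcx)
      simp [ha, this]
      ring

lemma pvG_snoc (items : List String) (x : String) :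
    pvG (items ++ [x]) = pvG items + (pvIdxList x items).sum + items.length := by
  unfold pvG
  rw [PySem.Set.ofList_append_singleton]
  simp only [pvIdxList_snoc]
  by_cases hx : x ∈ items
  · have hmem : x ∈ PySem.Set.ofList items := (PySem.Set.mem_ofList items x).mpr hx
    rw [PySem.Set.add_of_mem hmem]
    rw [pvSum_map_congr_except (PySem.Set.nodup_ofList items) hmem
      (fun c => (pvAccumulate (pvIdxList c items ++ if x == c then [(items.length : Int)] else [])).sum)
      (fun c => (pvAccumulate (pvIdxList c items)).sum)
      (by
        intro c _ hcx
        have hne : (x == c) = false := beq_eq_false_iff_ne.mpr (Ne.symm hcx)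
        simp [hne])]
    simp [pvAccum_sum_snoc]
    ring
  · have hmem : x ∉ PySem.Set.ofList items := fun h => hx ((PySem.Set.mem_ofList items x).mp h)
    rw [PySem.Set.add_of_not_mem hmem, List.map_append, List.sum_append]
    have hcongr : ∀ c ∈ PySem.Set.ofList items,
        (pvAccumulate (pvIdxList c items ++ if x == c then [(items.length : Int)] else [])).sum
          = (pvAccumulate (pvIdxList c items)).sum := by
      intro c hc
      have hne : (x == c) = false := by
        refine beq_eq_false_iff_ne.mpr ?_
        intro he; exact hmem (he ▸ hc)
      simp [hne]
    rw [List.map_congr_left hcongr]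
    simp [pvIdxList_of_not_mem x items hx, pvAccumulate]

lemma pvW_snoc (items : List String) (x : String) (d : PySem.Dict String Int) :
    pvW (items ++ [x]) d = pvW items d + d.getD x 0 * items.length := by
  unfold pvW
  rw [PySem.List.enumerate_append]
  simp [PySem.List.enumerate]

lemma pvW_insert_aux (l : List (Int × String)) (d : PySem.Dict String Int) (x : String) :
    (l.map (fun p => (d.insert x (d.getD x 0 + 1)).getD p.2 0 * p.1)).sum =
      (l.map (fun p => d.getD p.2 0 * p.1)).sum + ((l.filter (fun p => p.2 == x)).map (fun p => p.1)).sum := by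
  induction l with
  | nil => simp
  | cons p t ih =>
    simp only [List.map_cons, List.sum_cons, List.filter_cons, ih]
    by_cases hp : p.2 = x
    · simp [hp]; ring
    · simp [hp, PySem.Dict.getD_insert]; ring

lemma pvW_insert (items : List String) (d : PySem.Dict String Int) (x : String) :
    pvW items (d.insert x (d.getD x 0 + 1)) = pvW items d + (pvIdxList x items).sum := by
  unfold pvW pvIdxList
  exact pvW_insert_aux (PySem.List.enumerate items 0) d x

lemma pvW_empty (items : List String) : pvW items PySem.Dict.empty = 0 := by
  unfold pvW
  simp [PySem.Dict.getD_empty]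

lemma pvB_inv (items : List String) : ∀ (t : Int) (d : PySem.Dict String Int),
    ((PySem.List.pyRange ((items.length : Int) - 1) (-1) (-1)).foldl (pvBody items) (t, d)).1
      = t + pvG items + pvW items d := by
  induction items using List.reverseRecOn with
  | nil =>
    intro t d
    rw [PySem.List.pyRange_neg_one_eq_nil (by norm_num)]
    simp [pvG, pvW, PySem.Set.ofList, PySem.List.enumerate]
  | append_singleton items x ih =>
    intro t d
    have hn : ((items ++ [x]).length : Int) - 1 = (items.length : Int) := by
      simp
    rw [hn, PySem.List.pyRange_neg_one_cons (by omega)]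
    rw [List.foldl_cons]
    have hget : PySem.List.pyGetD (items ++ [x]) (items.length : Int) "" = x := by
      rw [PySem.List.pyGetD_natCast]
      simp [List.getD_eq_getElem?_getD]
    have hbody : pvBody (items ++ [x]) (t, d) (items.length : Int) =
        (t + (d.getD x 0 + 1) * items.length, d.insert x (d.getD x 0 + 1)) := by
      simp [pvBody, hget, PySem.Dict.getD_insert_self]
    rw [hbody]
    rw [PySem.List.foldl_congr_mem _ (pvBody (items ++ [x])) (pvBody items) _ (by
      intro acc idx hidx
      rcases PySem.List.mem_pyRange_neg_one.mp hidx with ⟨h1, h2⟩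
      have h0 : 0 ≤ idx := by omega
      have hlt : idx < (items.length : Int) := by omega
      have hget1 : PySem.List.pyGetD (items ++ [x]) idx "" = PySem.List.pyGetD items idx "" := by
        rw [PySem.List.pyGetD_eq_getElem _ _ h0 (by simp; omega),
            PySem.List.pyGetD_eq_getElem _ _ h0 (by omega)]
        exact List.getElem_append_left (by omega)
      simp [pvBody, hget1])]
    rw [ih]
    rw [pvG_snoc, pvW_snoc, pvW_insert]
    ring

lemma pvAlt_eq_G (items : List String) : sum_indices_alt items = pvG items := by
  have h : sum_indices_alt items =
      ((PySem.List.pyRange (PySem.List.len items - 1) (-1) (-1)).foldl (pvBody items)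
        (0, PySem.Dict.empty)).1 := rfl
  rw [h, PySem.List.len_eq, pvB_inv items 0 PySem.Dict.empty, pvW_empty]
  ring

lemma pvA_dict_eq (items : List String) :
    ((PySem.List.enumerate items 0).foldl
      (fun d p => d.modify p.2 [] (fun v => v ++ [p.1]))
      (PySem.Dict.empty : PySem.Dict String (List Int))).values
    = (PySem.Set.ofList items).map (fun c => pvIdxList c items) := by
  set E := PySem.List.enumerate items 0 with hE
  have hfold : E.foldl (fun d p => d.modify p.2 [] (fun v => v ++ [p.1]))
      (PySem.Dict.empty : PySem.Dict String (List Int))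
      = (E.map Prod.swap).foldl (fun d p => d.modify p.1 [] (fun v => v ++ [p.2]))
        (PySem.Dict.empty : PySem.Dict String (List Int)) := by
    rw [List.foldl_map]
    rfl
  have hkeys : ((E.map Prod.swap).foldl (fun d p => d.modify p.1 [] (fun v => v ++ [p.2]))
      (PySem.Dict.empty : PySem.Dict String (List Int))).keys = PySem.Set.ofList items := by
    have := PySem.Dict.keys_foldl_modify_key (E.map Prod.swap) (fun p => p.1) []
      (fun _ p => fun v => v ++ [p.2]) (PySem.Dict.empty : PySem.Dict String (List Int))
    rw [this, PySem.Dict.keys_empty, PySem.Set.update_nil_left]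
    congr 1
    rw [List.map_map]
    have : (Prod.fst ∘ Prod.swap : Int × String → String) = fun p => p.2 := rfl
    rw [this, hE, PySem.List.map_snd_enumerate]
  have hnodup : ((E.map Prod.swap).foldl (fun d p => d.modify p.1 [] (fun v => v ++ [p.2]))
      (PySem.Dict.empty : PySem.Dict String (List Int))).keys.Nodup := by
    apply PySem.Dict.nodup_keys_foldl_modify_key
    simp [PySem.Dict.keys_empty]
  have hgetD : ∀ c, ((E.map Prod.swap).foldl (fun d p => d.modify p.1 [] (fun v => v ++ [p.2]))
      (PySem.Dict.empty : PySem.Dict String (List Int))).getD c [] = pvIdxList c items := by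
    intro c
    rw [PySem.Dict.getD_foldl_modify_append, PySem.Dict.getD_empty]
    rw [List.filter_map, List.map_map]
    unfold pvIdxList
    rw [hE]
    congr 1
  rw [hfold, PySem.Dict.values_eq_map_keys _ hnodup [], hkeys]
  exact List.map_congr_left (fun c _ => hgetD c)

lemma pvA_eq_G (items : List String) (h2 : ¬ (PySem.List.len items ≤ 1)) :
    sum_indices items = pvG items := by
  unfold sum_indices
  rw [if_neg h2]
  simp only [pvA_dict_eq, List.map_map]
  rfl

lemma pvG_nil : pvG [] = 0 := by
  simp [pvG, PySem.Set.ofList]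

lemma pvG_singleton (x : String) : pvG [x] = 0 := by
  simp [pvG, PySem.Set.ofList, PySem.Set.add, pvIdxList, PySem.List.enumerate, pvAccumulate]

-- ===== VERDICT (by name: the statement is the Claim_ definition above) =====
theorem sum_indices_spec : Claim_equal_sum_indices := by
  intro items _
  unfold Spec_sum_indices
  rw [pvAlt_eq_G]
  by_cases h : PySem.List.len items ≤ 1
  · unfold sum_indices
    rw [if_pos h]
    rw [PySem.List.len_eq] at h
    match items, h with
    | [], _ => exact pvG_nil.symm
    | [x], _ => exact (pvG_singleton x).symm
    | a :: b :: t, h => simp at h; omega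
  · exact pvA_eq_G items h
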